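-- pv_equiv track=rewrite | github.com/chrislasota/advent-of-code-2023 | day_07/advent_07_1.py | determine_hand_type_score
-- ===== SOURCE A (Python) =====
-- def determine_hand_type_score(hand_str) -> int:
--     # This method returns a UNIQUE score for any legal hand, based on which
--     # "type" of hand it is, classified the same way ordinary poker hands are
--     # classified: 5 of a kind, 4 of a kind, full house, 3 of a kind, 2 pair,
--     # 1 pair, and "nothing".  The INITIAL scores are assigned as follows:
--     #
--     #  5 of a kind : 6000000
--     #  4 of a kind : 5000000
--     #  Full house  : 4000000
--     #  3 of a kind : 3000000
--     #  2 pair      : 2000000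
--     #  1 pair      : 1000000
--     #  Nothing     : 0
--     #
--     # The INITIAL score is modified by adding a unique integer created by treating
--     # each character in hand_str as if it were a base-15 representation.
--     #
--     # Every 'legal' hand is a 5-character string from the set {23456789TJKQA}
--     # Associated to each of these characters is a integer value from 2 to 14.
--     # This integer value will be used as the index in a histogram list
--     # which tallies how many of each kind of card exists in the hand.
--     #
--     # A 15-element list will act as a histogram to count how many of each
--     # face card exists in a hand.  We use 15 elements instead of 13 as a
--     # mental convenience -- nothing more.
--     #
--     # EXAMPLE:  Suppose we are given a string '4QT3T'.  The histogram list
--     #           Will have the following form: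
--     #           [0, 0, 0, 1, 1, 0, 0, 0, 0, 0, 2, 0, 1, 0, 0]
--     #           We can see that list locations [3] and [4] each have a value
--     #           of 1, which tells us there is a single '3' and '4' in the hand.
--     #           List location [10] has a 2, telling us the hand contains 2 'T'
--     #           characters.  Finally list location [12] contains a 1, so the
--     #           hand has a single 'Q' character.  All locations containing
--     #           a 0 tell us there are no characters of that kind in the hand.
--     #
--     # Note that there's always a zero at list locations [0] and [1].  Again
--     # this is just done for the mental convenience of assigined the usual
--     # numeric face values for cards to their respective histogram indices.
--     #
--     # Once the histogram is made, we can determine the "type" of hand our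
--     # string represents, and assign it the score described above.
--     #
--     # Our example above would get an INITIAL score of 1000000, because it is
--     # 1 pair.  Then we would add 245305 which is the integer value of the hand
--     # interpreted as a base-15 number (4*50625 + 12*3375 + 10*225 + 3*15 + 10)
--     # This method would susequently return a value of 1245305 for hand '4QT3T'
--
--     face_dict = {'A': 14, 'K': 13, 'Q': 12, 'J': 11, 'T': 10, '9': 9, '8':  8,
--                  '7':  7, '6':  6, '5':  5, '4':  4, '3':  3, '2': 2}
--
--     histogram = [0, 0, 0, 0, 0, 0, 0, 0, 0, 0, 0, 0, 0, 0, 0]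
--     powers_of_fifteen = [1, 15, 225, 3375, 50625]
--     high_card_value = 0
--     for index in range(5):
--         face_value = face_dict[hand_str[index]]
--         histogram[face_value] += 1
--         high_card_value += face_value * powers_of_fifteen[4 - index]
--
--     sorted_histogram = sorted(histogram, reverse=True)  # NOTE the reverse!!!
--     biggest = sorted_histogram[0]
--     big     = sorted_histogram[1]
--
--     # This ugly "if cascade" is used for speed purposes
--     if biggest == 1:              # nothing
--         return high_card_value
--     if biggest == 2 and big == 1: # one pair
--         return 1000000 + high_card_value
--     if biggest == 2 and big == 2: # two pair
--         return 2000000 + high_card_value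
--     if biggest == 3 and big == 1: # 3 of a kind
--         return 3000000 + high_card_value
--     if biggest == 3 and big == 2: # full house
--         return 4000000 + high_card_value
--     if biggest == 4:              # 4 of a kind
--         return 5000000 + high_card_value
--     if biggest == 5:              # 5 of a kind
--         return 6000000 + high_card_value
-- ===== SOURCE B (Python) =====
-- def determine_hand_type_score(hand_str) -> int:
--     # Classify by the sum of squared multiplicities of the 5 cards (a unique
--     # number per hand type), looked up in a table; high-card value by Horner.
--     face_dict = {'A': 14, 'K': 13, 'Q': 12, 'J': 11, 'T': 10, '9': 9, '8':  8,
--                  '7':  7, '6':  6, '5':  5, '4':  4, '3':  3, '2': 2}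
--
--     vals = []
--     high_card_value = 0
--     for index in range(5):
--         face_value = face_dict[hand_str[index]]
--         vals.append(face_value)
--         high_card_value = high_card_value * 15 + face_value
--
--     # sum over the 5 cards of the multiplicity of that card = sum of squared
--     # multiplicities: 25->5 of a kind, 17->4 of a kind, 13->full house,
--     # 11->3 of a kind, 9->two pair, 7->one pair, 5->nothing.
--     q = sum(vals.count(v) for v in vals)
--     base = {5: 0, 7: 1000000, 9: 2000000, 11: 3000000,
--             13: 4000000, 17: 5000000, 25: 6000000}[q]
--     return base + high_card_value
-- ===== Notes on version B (the rewrite author's own statement) =====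
-- stated objective: simpler
-- what changed: Replaces the 15-slot histogram + reverse sort + if-cascade with a direct sum-of-squared-multiplicities signature (sum over the 5 cards of that card's count, unique per hand type) looked up in a 7-entry table, and computes the high-card value by Horner evaluation instead of a powers-of-fifteen table.
import Mathlib
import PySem

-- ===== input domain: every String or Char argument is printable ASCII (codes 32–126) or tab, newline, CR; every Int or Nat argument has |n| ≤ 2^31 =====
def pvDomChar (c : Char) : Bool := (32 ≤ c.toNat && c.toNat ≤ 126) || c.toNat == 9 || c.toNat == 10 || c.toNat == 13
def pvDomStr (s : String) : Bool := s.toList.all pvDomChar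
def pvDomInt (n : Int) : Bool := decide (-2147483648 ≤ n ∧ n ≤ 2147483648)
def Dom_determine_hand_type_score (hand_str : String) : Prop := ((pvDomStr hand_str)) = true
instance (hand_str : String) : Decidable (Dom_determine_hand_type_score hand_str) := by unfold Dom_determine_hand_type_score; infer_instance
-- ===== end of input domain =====

-- B replaces A's 15-slot histogram + reverse sort + if-cascade by a sum-of-squared-multiplicities
-- signature looked up in a 7-entry table, and Horner evaluation of the high-card value (objective: simpler).

-- ===== PORT A =====
def pvFaceDict : PySem.Dict Char Int :=
  PySem.Dict.ofList [('A',14),('K',13),('Q',12),('J',11),('T',10),('9',9),('8',8),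
                     ('7',7),('6',6),('5',5),('4',4),('3',3),('2',2)]

def determine_hand_type_score (hand_str : String) : Int :=
  let face_dict := pvFaceDict
  let histogram : List Int := [0,0,0,0,0,0,0,0,0,0,0,0,0,0,0]
  let powers_of_fifteen : List Int := [1,15,225,3375,50625]
  let st :=
    (PySem.List.pyRange 0 5 1).foldl
      (fun (st : List Int × Int) index =>
        let face_value := (face_dict.get? ((PySem.Str.pyGet? hand_str index).getD ' ')).getD 0
        (PySem.List.pySetD st.1 face_value (PySem.List.pyGetD st.1 face_value 0 + 1),
         st.2 + face_value * PySem.List.pyGetD powers_of_fifteen (4 - index) 0))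
      (histogram, 0)
  let high_card_value := st.2
  let sorted_histogram := PySem.List.sorted st.1 (fun x => x) true
  let biggest := PySem.List.pyGetD sorted_histogram 0 0
  let big := PySem.List.pyGetD sorted_histogram 1 0
  if biggest == 1 then high_card_value
  else if biggest == 2 && big == 1 then 1000000 + high_card_value
  else if biggest == 2 && big == 2 then 2000000 + high_card_value
  else if biggest == 3 && big == 1 then 3000000 + high_card_value
  else if biggest == 3 && big == 2 then 4000000 + high_card_value
  else if biggest == 4 then 5000000 + high_card_value
  else if biggest == 5 then 6000000 + high_card_value
  else 0   -- Python falls off the end (returns None) here; unreachable for hands admitted by Pre_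

-- ===== PORT B =====
def determine_hand_type_score_alt (hand_str : String) : Int :=
  let face_dict := pvFaceDict
  let st :=
    (PySem.List.pyRange 0 5 1).foldl
      (fun (st : List Int × Int) index =>
        let face_value := (face_dict.get? ((PySem.Str.pyGet? hand_str index).getD ' ')).getD 0
        (st.1 ++ [face_value], st.2 * 15 + face_value))
      (([] : List Int), 0)
  let vals := st.1
  let high_card_value := st.2
  let q : Int := (vals.map (fun v => (PySem.List.count vals v : Int))).sum
  let base := ((PySem.Dict.ofList [((5:Int), (0:Int)), (7, 1000000), (9, 2000000), (11, 3000000),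
                                   (13, 4000000), (17, 5000000), (25, 6000000)]).get? q).getD 0
  base + high_card_value

-- ===== PRECONDITION & SPEC =====
def pvFaceChars : List Char := ['A','K','Q','J','T','9','8','7','6','5','4','3','2']

-- Pre_ excludes exactly the inputs on which Python A raises: strings shorter than 5
-- characters (IndexError) and strings whose first 5 characters are not all card faces (KeyError).
def Pre_determine_hand_type_score (hand_str : String) : Prop :=
  5 ≤ hand_str.toList.length ∧ ((hand_str.toList.take 5).all (fun c => pvFaceChars.contains c)) = true
instance (hand_str : String) : Decidable (Pre_determine_hand_type_score hand_str) := by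
  unfold Pre_determine_hand_type_score; infer_instance

def pvWitness_determine_hand_type_score : String := "32T3K"

def Spec_determine_hand_type_score (hand_str : String) (out : Int) : Prop := out = determine_hand_type_score_alt hand_str
instance (hand_str : String) (out : Int) : Decidable (Spec_determine_hand_type_score hand_str out) := by unfold Spec_determine_hand_type_score; infer_instance

-- ===== CLAIM (what is proved, stated in full; the proofs are below) =====
def Claim_equal_determine_hand_type_score : Prop := ∀ (hand_str : String), Dom_determine_hand_type_score hand_str → Pre_determine_hand_type_score hand_str → Spec_determine_hand_type_score hand_str (determine_hand_type_score hand_str)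

-- ===== LEMMAS AND PROOFS =====

-- one histogram increment, exactly as port A performs it
def pvIncr (h : List Int) (v : Int) : List Int :=
  PySem.List.pySetD h v (PySem.List.pyGetD h v 0 + 1)

def pvRng : List Int := [0,1,2,3,4,5,6,7,8,9,10,11,12,13,14]

-- the histogram of a value list: slot j holds the multiplicity of j
def pvCnt (l : List Int) : List Int := pvRng.map (fun j => (l.count j : Int))

theorem pvCnt_nil : pvCnt [] = [0,0,0,0,0,0,0,0,0,0,0,0,0,0,0] := by decide

theorem pvIncr_pvCnt (p : List Int) (v : Int) (h0 : 0 ≤ v) (h15 : v < 15) :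
    pvIncr (pvCnt p) v = pvCnt (p ++ [v]) := by
  have hlen : (pvCnt p).length = 15 := by simp [pvCnt, pvRng]
  have hget : PySem.List.pyGetD (pvCnt p) v 0 = (p.count v : Int) := by
    rw [PySem.List.pyGetD_eq_getElem (pvCnt p) 0 h0 (by rw [hlen]; omega)]
    simp only [pvCnt, pvRng]
    have : v.toNat < 15 := by omega
    interval_cases v <;> simp
  apply List.ext_getElem
  · simp [pvIncr, pvCnt, pvRng, PySem.List.pySetD_of_nonneg _ _ h0]
  · intro i hi hi'
    have hi15 : i < 15 := by simpa [pvCnt, pvRng] using hi'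
    simp only [pvIncr, PySem.List.pySetD_of_nonneg _ _ h0, hget]
    rw [List.getElem_set]
    by_cases hvi : v.toNat = i
    · have hv2 : v = (i : Int) := by omega
      subst hv2
      simp only [pvCnt, pvRng, hvi]
      interval_cases i <;> simp [List.count_append]
    · have hne : ¬ ((i:Int) = v) := by omega
      simp only [pvCnt, pvRng, if_neg hvi]
      interval_cases i <;> simp [List.count_append, List.count_cons] <;> omega

theorem pv_sum_ite (x : Int) (h0 : 0 ≤ x) (h15 : x < 15) (f : Int → Int) :
    (pvRng.map (fun j => if j = x then f j else 0)).sum = f x := by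
  interval_cases x <;> norm_num [pvRng]

theorem pv_sum_map_count (l : List Int) (f : Int → Int) (h : ∀ v ∈ l, 0 ≤ v ∧ v < 15) :
    (l.map f).sum = (pvRng.map (fun j => (l.count j : Int) * f j)).sum := by
  induction l with
  | nil => simp
  | cons x t ih =>
    have hx := h x (by simp)
    have ht : ∀ v ∈ t, 0 ≤ v ∧ v < 15 := fun v hv => h v (by simp [hv])
    have hstep : ∀ j ∈ pvRng, ((x :: t).count j : Int) * f j
        = ((t.count j : Int) * f j) + (if j = x then f j else 0) := by
      intro j _
      by_cases hj : j = x
      · subst hj; simp; ring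
      · simp [List.count_cons, hj]
        exact Or.inl (fun h' => hj h'.symm)
    calc ((x :: t).map f).sum = f x + (t.map f).sum := by simp
      _ = f x + (pvRng.map (fun j => (t.count j : Int) * f j)).sum := by rw [ih ht]
      _ = (pvRng.map (fun j => ((x :: t).count j : Int) * f j)).sum := by
            rw [List.map_congr_left hstep, PySem.List.sum_map_add_int,
                pv_sum_ite x hx.1 hx.2 f]
            ring

-- the heart: A's cascade over the two biggest slots of a 15-slot histogram holding
-- 5 cards equals B's sum-of-squares table lookup
theorem pv_core (q hv : Int) (s : List Int)
    (hslen : s.length = 15) (hpw : s.Pairwise (fun a b : Int => b ≤ a))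
    (hsum : s.sum = 5) (hq : (s.map (fun x => x * x)).sum = q)
    (hnn : ∀ x ∈ s, 0 ≤ x) :
    (if PySem.List.pyGetD s 0 0 == 1 then hv
     else if PySem.List.pyGetD s 0 0 == 2 && PySem.List.pyGetD s 1 0 == 1 then 1000000 + hv
     else if PySem.List.pyGetD s 0 0 == 2 && PySem.List.pyGetD s 1 0 == 2 then 2000000 + hv
     else if PySem.List.pyGetD s 0 0 == 3 && PySem.List.pyGetD s 1 0 == 1 then 3000000 + hv
     else if PySem.List.pyGetD s 0 0 == 3 && PySem.List.pyGetD s 1 0 == 2 then 4000000 + hv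
     else if PySem.List.pyGetD s 0 0 == 4 then 5000000 + hv
     else if PySem.List.pyGetD s 0 0 == 5 then 6000000 + hv
     else 0)
    = ((PySem.Dict.ofList [((5:Int), (0:Int)), (7, 1000000), (9, 2000000), (11, 3000000),
                           (13, 4000000), (17, 5000000), (25, 6000000)]).get? q).getD 0 + hv := by
  rcases s with _|⟨a0,_|⟨a1,_|⟨a2,_|⟨a3,_|⟨a4,_|⟨a5,_|⟨a6,_|⟨a7,_|⟨a8,_|⟨a9,_|⟨a10,_|⟨a11,_|⟨a12,_|⟨a13,_|⟨a14,t⟩⟩⟩⟩⟩⟩⟩⟩⟩⟩⟩⟩⟩⟩⟩ <;>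
    simp only [List.length_cons, List.length_nil] at hslen <;> try omega
  have ht : t = [] := List.eq_nil_of_length_eq_zero (by omega)
  subst ht
  simp only [List.pairwise_cons, List.mem_cons, List.not_mem_nil, or_false, forall_eq_or_imp,
    forall_eq, IsEmpty.forall_iff] at hpw
  simp only [List.sum_cons, List.sum_nil, add_zero] at hsum
  simp only [List.map_cons, List.map_nil, List.sum_cons, List.sum_nil, add_zero] at hq
  have h14 : (0:Int) ≤ a14 := hnn a14 (by simp)
  have hz5 : a5 = 0 := by omega
  have hz6 : a6 = 0 := by omega
  have hz7 : a7 = 0 := by omega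
  have hz8 : a8 = 0 := by omega
  have hz9 : a9 = 0 := by omega
  have hz10 : a10 = 0 := by omega
  have hz11 : a11 = 0 := by omega
  have hz12 : a12 = 0 := by omega
  have hz13 : a13 = 0 := by omega
  have hz14 : a14 = 0 := by omega
  subst hz5 hz6 hz7 hz8 hz9 hz10 hz11 hz12 hz13 hz14
  subst hq
  simp only [PySem.List.pyGetD_ofNat', List.getD_cons_succ, List.getD_cons_zero]
  have l0 : 0 ≤ a0 := by omega
  have b1 : a0 ≤ 5 := by omega
  have l1 : 0 ≤ a1 := by omega
  have c1 : a1 ≤ a0 := by omega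
  have l2 : 0 ≤ a2 := by omega
  have c2 : a2 ≤ a1 := by omega
  have l3 : 0 ≤ a3 := by omega
  have c3 : a3 ≤ a2 := by omega
  have b0 : 0 ≤ a4 := by omega
  have c4 : a4 ≤ a3 := by omega
  clear hpw hnn hslen
  interval_cases a0 <;> interval_cases a1 <;> interval_cases a2 <;> interval_cases a3 <;>
    interval_cases a4 <;> first | omega | (norm_num; decide)

theorem pv_face_range : ∀ c ∈ pvFaceChars,
    0 ≤ (pvFaceDict.get? c).getD 0 ∧ (pvFaceDict.get? c).getD 0 < 15 := by
  intro c hc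
  fin_cases hc <;> decide

-- ===== VERDICT (by name: the statement is the Claim_ definition above) =====
theorem determine_hand_type_score_spec : Claim_equal_determine_hand_type_score := by
  intro hand_str _ hPre
  obtain ⟨hlen, hmem'⟩ := hPre
  have hmem : ∀ c ∈ hand_str.toList.take 5, c ∈ pvFaceChars := by
    intro c hc
    have := List.all_eq_true.mp hmem' c hc
    simpa using this
  unfold Spec_determine_hand_type_score
  rcases hl : hand_str.toList with _|⟨c0,_|⟨c1,_|⟨c2,_|⟨c3,_|⟨c4,rest⟩⟩⟩⟩⟩ <;>
    rw [hl] at hlen <;> simp only [List.length_nil, List.length_cons] at hlen <;> try omega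
  rw [hl] at hmem
  simp only [List.take_succ_cons, List.take_zero] at hmem
  have hm0 : c0 ∈ pvFaceChars := hmem c0 (by simp)
  have hm1 : c1 ∈ pvFaceChars := hmem c1 (by simp)
  have hm2 : c2 ∈ pvFaceChars := hmem c2 (by simp)
  have hm3 : c3 ∈ pvFaceChars := hmem c3 (by simp)
  have hm4 : c4 ∈ pvFaceChars := hmem c4 (by simp)
  have hrl : (0:Int) ≤ (rest.length : Int) := Int.natCast_nonneg rest.length
  have hg0 : PySem.Str.pyGet? hand_str 0 = some c0 := by
    simp [PySem.Str.pyGet?, PySem.List.pyGet?, hl, PySem.List.pyIdx?]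
    try rw [if_pos (by omega)]
    try simp
  have hg1 : PySem.Str.pyGet? hand_str 1 = some c1 := by
    simp [PySem.Str.pyGet?, PySem.List.pyGet?, hl, PySem.List.pyIdx?]
    try rw [if_pos (by omega)]
    try simp
  have hg2 : PySem.Str.pyGet? hand_str 2 = some c2 := by
    simp [PySem.Str.pyGet?, PySem.List.pyGet?, hl, PySem.List.pyIdx?]
    try rw [if_pos (by omega)]
    try simp
  have hg3 : PySem.Str.pyGet? hand_str 3 = some c3 := by
    simp [PySem.Str.pyGet?, PySem.List.pyGet?, hl, PySem.List.pyIdx?]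
    try rw [if_pos (by omega)]
    try simp
  have hg4 : PySem.Str.pyGet? hand_str 4 = some c4 := by
    simp [PySem.Str.pyGet?, PySem.List.pyGet?, hl, PySem.List.pyIdx?]
    try rw [if_pos (by omega)]
    try simp
  have hR : PySem.List.pyRange 0 5 1 = [0,1,2,3,4] := by decide
  set v0 := (pvFaceDict.get? c0).getD 0 with hv0
  set v1 := (pvFaceDict.get? c1).getD 0 with hv1
  set v2 := (pvFaceDict.get? c2).getD 0 with hv2
  set v3 := (pvFaceDict.get? c3).getD 0 with hv3
  set v4 := (pvFaceDict.get? c4).getD 0 with hv4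
  have hr0 := pv_face_range c0 hm0
  have hr1 := pv_face_range c1 hm1
  have hr2 := pv_face_range c2 hm2
  have hr3 := pv_face_range c3 hm3
  have hr4 := pv_face_range c4 hm4
  have hinc : ∀ (h : List Int) (v : Int),
      PySem.List.pySetD h v (PySem.List.pyGetD h v 0 + 1) = pvIncr h v := fun _ _ => rfl
  have hhist : pvIncr (pvIncr (pvIncr (pvIncr (pvIncr
      ([0,0,0,0,0,0,0,0,0,0,0,0,0,0,0] : List Int) v0) v1) v2) v3) v4
      = pvCnt [v0, v1, v2, v3, v4] := by
    rw [← pvCnt_nil,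
        pvIncr_pvCnt [] v0 hr0.1 hr0.2,
        pvIncr_pvCnt _ v1 hr1.1 hr1.2,
        pvIncr_pvCnt _ v2 hr2.1 hr2.2,
        pvIncr_pvCnt _ v3 hr3.1 hr3.2,
        pvIncr_pvCnt _ v4 hr4.1 hr4.2]
    simp
  have hvals : ∀ v ∈ ([v0, v1, v2, v3, v4] : List Int), 0 ≤ v ∧ v < 15 := by
    intro v hv
    simp only [List.mem_cons, List.not_mem_nil, or_false] at hv
    rcases hv with rfl|rfl|rfl|rfl|rfl
    exacts [hr0, hr1, hr2, hr3, hr4]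
  -- B's sum-of-squares signature
  set q : Int := (([v0, v1, v2, v3, v4] : List Int).map
      (fun v => (PySem.List.count [v0, v1, v2, v3, v4] v : Int))).sum with hqdef
  -- characterize the reverse-sorted histogram
  set s := PySem.List.sorted (pvCnt [v0, v1, v2, v3, v4]) (fun x => x) true with hs
  have hperm : s.Perm (pvCnt [v0, v1, v2, v3, v4]) := PySem.List.sorted_perm _ _ _
  have hpw : s.Pairwise (fun a b : Int => b ≤ a) := by
    have := PySem.List.sorted_pairwise_rev (pvCnt [v0, v1, v2, v3, v4]) (fun x : Int => x)
    simpa using this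
  have hslen : s.length = 15 := by
    rw [hs, PySem.List.length_sorted]; simp [pvCnt, pvRng]
  have hsum : s.sum = 5 := by
    rw [hperm.sum_eq]
    have h1 := pv_sum_map_count [v0, v1, v2, v3, v4] (fun _ => 1) hvals
    simp only [mul_one] at h1
    have h2 : (pvCnt [v0, v1, v2, v3, v4]).sum
        = (pvRng.map (fun j => (([v0, v1, v2, v3, v4] : List Int).count j : Int))).sum := rfl
    rw [h2, ← h1]
    simp
  have hq : (s.map (fun x => x * x)).sum = q := by
    rw [(hperm.map (fun x : Int => x * x)).sum_eq]
    have h2 := pv_sum_map_count [v0, v1, v2, v3, v4]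
      (fun v => (([v0, v1, v2, v3, v4] : List Int).count v : Int)) hvals
    have hmm : (pvCnt [v0, v1, v2, v3, v4]).map (fun x : Int => x * x)
        = pvRng.map (fun j => (([v0, v1, v2, v3, v4] : List Int).count j : Int)
            * (([v0, v1, v2, v3, v4] : List Int).count j : Int)) := by
      simp [pvCnt, List.map_map, Function.comp]
    rw [hmm, ← h2, hqdef]
    simp [PySem.List.count_eq]
  have hnn : ∀ x ∈ s, 0 ≤ x := by
    intro x hx
    rw [hs, PySem.List.mem_sorted] at hx
    obtain ⟨j, _, rfl⟩ := List.mem_map.mp hx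
    exact Int.natCast_nonneg _
  -- now unfold both ports
  show determine_hand_type_score hand_str = determine_hand_type_score_alt hand_str
  unfold determine_hand_type_score determine_hand_type_score_alt
  rw [hR]
  simp only [List.foldl_cons, List.foldl_nil, hg0, hg1, hg2, hg3, hg4, Option.getD_some]
  simp only [show (4:Int) - 0 = 4 from by decide, show (4:Int) - 1 = 3 from by decide,
    show (4:Int) - 2 = 2 from by decide, show (4:Int) - 3 = 1 from by decide,
    show (4:Int) - 4 = 0 from by decide]
  rw [show PySem.List.pyGetD ([1,15,225,3375,50625] : List Int) 4 0 = 50625 from by decide,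
      show PySem.List.pyGetD ([1,15,225,3375,50625] : List Int) 3 0 = 3375 from by decide,
      show PySem.List.pyGetD ([1,15,225,3375,50625] : List Int) 2 0 = 225 from by decide,
      show PySem.List.pyGetD ([1,15,225,3375,50625] : List Int) 1 0 = 15 from by decide,
      show PySem.List.pyGetD ([1,15,225,3375,50625] : List Int) 0 0 = 1 from by decide]
  simp only [hinc, ← hv0, ← hv1, ← hv2, ← hv3, ← hv4]
  rw [hhist, ← hs]
  simp only [List.nil_append, List.cons_append]
  rw [← hqdef]
  rw [pv_core q _ s hslen hpw hsum hq hnn]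
  ring
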